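-- pv_equiv track=rewrite | github.com/jaaaana/vi_proekt | red_po_red.py | find_optimal_swaps
-- ===== SOURCE A (Python) =====
-- def find_optimal_swaps(grid, solution, colors):
--     swaps = []
--     for i1 in range(5):
--         for j1 in range(5):
--             if colors[i1][j1] == 0:
--                 continue
--             for i2 in range(5):
--                 for j2 in range(5):
--                     if (i1, j1) == (i2, j2) or colors[i2][j2]:
--                         continue
--                     if (
--                         grid[i1][j1] == solution[i2][j2]
--                         and grid[i2][j2] == solution[i1][j1]
--                     ):
--                         swaps.append((i1, j1, i2, j2))
--     return swaps
-- ===== SOURCE B (Python) =====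
-- def find_optimal_swaps(grid, solution, colors):
--     # index every uncolored cell by the (solution, grid) value pair it carries
--     index = {}
--     for i in range(5):
--         for j in range(5):
--             if not colors[i][j]:
--                 index.setdefault((solution[i][j], grid[i][j]), []).append((i, j))
--     swaps = []
--     for i1 in range(5):
--         for j1 in range(5):
--             if colors[i1][j1]:
--                 for (i2, j2) in index.get((grid[i1][j1], solution[i1][j1]), []):
--                     swaps.append((i1, j1, i2, j2))
--     return swaps
-- ===== Notes on version B (the rewrite author's own statement) =====
-- stated objective: alternative
-- what changed: B builds a dict from (solution,grid) value pair to the row-major list of uncolored positions once, then answers each colored cell by a single lookup, replacing A's rescan of all 25 cells for every colored cell; Pre_ excludes inputs smaller than 5x5, on which A raises IndexError.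
import Mathlib
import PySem

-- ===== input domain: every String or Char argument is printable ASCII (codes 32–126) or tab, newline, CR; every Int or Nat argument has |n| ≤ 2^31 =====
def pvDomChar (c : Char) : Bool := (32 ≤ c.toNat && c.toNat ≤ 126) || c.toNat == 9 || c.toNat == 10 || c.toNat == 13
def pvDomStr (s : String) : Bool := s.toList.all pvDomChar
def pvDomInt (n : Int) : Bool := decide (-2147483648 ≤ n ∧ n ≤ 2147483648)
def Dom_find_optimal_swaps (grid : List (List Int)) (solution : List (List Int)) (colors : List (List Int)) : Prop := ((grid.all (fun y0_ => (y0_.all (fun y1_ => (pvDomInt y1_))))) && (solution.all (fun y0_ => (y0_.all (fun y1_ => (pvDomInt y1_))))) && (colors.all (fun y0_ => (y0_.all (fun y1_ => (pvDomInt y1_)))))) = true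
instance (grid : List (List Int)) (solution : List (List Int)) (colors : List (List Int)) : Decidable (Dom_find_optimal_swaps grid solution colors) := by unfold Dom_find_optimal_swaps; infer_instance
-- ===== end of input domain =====

-- B replaces A's quadratic rescan of all 25 cells per colored cell by a dict built once
-- over the uncolored cells, looked up per colored cell (idiomatic/alternative; same answers in the same order).

-- shared subscripting helper: m[i][j]; the default is only reached outside Pre_
def pvAt (m : List (List Int)) (i j : Int) : Int :=
  PySem.List.pyGetD (PySem.List.pyGetD m i []) j 0

-- ===== PORT A =====
def find_optimal_swaps (grid : List (List Int)) (solution : List (List Int)) (colors : List (List Int)) : List (Int × Int × Int × Int) :=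
  (PySem.List.pyRange 0 5 1).foldl (fun swaps i1 =>
    (PySem.List.pyRange 0 5 1).foldl (fun swaps j1 =>
      if pvAt colors i1 j1 == 0 then swaps else
      (PySem.List.pyRange 0 5 1).foldl (fun swaps i2 =>
        (PySem.List.pyRange 0 5 1).foldl (fun swaps j2 =>
          if (i1, j1) == (i2, j2) || !(pvAt colors i2 j2 == 0) then swaps
          else if pvAt grid i1 j1 == pvAt solution i2 j2 && pvAt grid i2 j2 == pvAt solution i1 j1
            then swaps ++ [(i1, j1, i2, j2)] else swaps) swaps) swaps) swaps) []

-- ===== PORT B =====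
def find_optimal_swaps_alt (grid : List (List Int)) (solution : List (List Int)) (colors : List (List Int)) : List (Int × Int × Int × Int) :=
  let index : PySem.Dict (Int × Int) (List (Int × Int)) :=
    (PySem.List.pyRange 0 5 1).foldl (fun d i =>
      (PySem.List.pyRange 0 5 1).foldl (fun d j =>
        if pvAt colors i j == 0 then
          d.insert (pvAt solution i j, pvAt grid i j)
            (d.getD (pvAt solution i j, pvAt grid i j) [] ++ [(i, j)])
        else d) d) PySem.Dict.empty
  (PySem.List.pyRange 0 5 1).foldl (fun swaps i1 =>
    (PySem.List.pyRange 0 5 1).foldl (fun swaps j1 =>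
      if !(pvAt colors i1 j1 == 0) then
        swaps ++ (index.getD (pvAt grid i1 j1, pvAt solution i1 j1) []).map
          (fun p => (i1, j1, p.1, p.2))
      else swaps) swaps) []

-- ===== PRECONDITION & SPEC =====
-- Pre_: the Python A indexes the first 5 rows and 5 columns of all three lists; on anything
-- smaller it raises IndexError, so exactly those inputs are excluded.
def Pre_find_optimal_swaps (grid : List (List Int)) (solution : List (List Int)) (colors : List (List Int)) : Prop :=
  5 ≤ grid.length ∧ (∀ r ∈ grid.take 5, 5 ≤ r.length) ∧
  5 ≤ solution.length ∧ (∀ r ∈ solution.take 5, 5 ≤ r.length) ∧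
  5 ≤ colors.length ∧ (∀ r ∈ colors.take 5, 5 ≤ r.length)
instance (grid : List (List Int)) (solution : List (List Int)) (colors : List (List Int)) : Decidable (Pre_find_optimal_swaps grid solution colors) := by unfold Pre_find_optimal_swaps; infer_instance

def pvWitness_find_optimal_swaps : List (List Int) × List (List Int) × List (List Int) :=
  ([[0,0,0,0,0],[0,0,0,0,0],[0,0,0,0,0],[0,0,0,0,0],[0,0,0,0,0]],
   [[0,0,0,0,0],[0,0,0,0,0],[0,0,0,0,0],[0,0,0,0,0],[0,0,0,0,0]],
   [[0,0,0,0,0],[0,0,0,0,0],[0,0,0,0,0],[0,0,0,0,0],[0,0,0,0,0]])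

def Spec_find_optimal_swaps (grid : List (List Int)) (solution : List (List Int)) (colors : List (List Int)) (out : List (Int × Int × Int × Int)) : Prop := out = find_optimal_swaps_alt grid solution colors
instance (grid : List (List Int)) (solution : List (List Int)) (colors : List (List Int)) (out : List (Int × Int × Int × Int)) : Decidable (Spec_find_optimal_swaps grid solution colors out) := by unfold Spec_find_optimal_swaps; infer_instance

-- ===== CLAIM (what is proved, stated in full; the proofs are below) =====
def Claim_equal_find_optimal_swaps : Prop := ∀ (grid : List (List Int)) (solution : List (List Int)) (colors : List (List Int)), Dom_find_optimal_swaps grid solution colors → Pre_find_optimal_swaps grid solution colors → Spec_find_optimal_swaps grid solution colors (find_optimal_swaps grid solution colors)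

-- ===== LEMMAS AND PROOFS =====

-- a nested fold over two index lists is a flat fold over the list of index pairs
theorem pvFoldlNested {α : Type} (L M : List Int) (f : α → Int → Int → α) (init : α) :
    L.foldl (fun a i => M.foldl (fun a j => f a i j) a) init
      = (L.flatMap (fun i => M.map (fun j => (i, j)))).foldl (fun a p => f a p.1 p.2) init := by
  induction L generalizing init with
  | nil => rfl
  | cons i L ih => simp [List.foldl_append, List.foldl_map, ih]

-- the dict built by appending each kept element under its key, read back at one key,
-- is the filter of the traversed list on "kept and carries that key"
theorem pvBuildGetD (cc : Int × Int → Bool) (key : Int × Int → Int × Int)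
    (L : List (Int × Int)) (d : PySem.Dict (Int × Int) (List (Int × Int))) (k : Int × Int) :
    (L.foldl (fun d p => if cc p then d.insert (key p) (d.getD (key p) [] ++ [p]) else d) d).getD k []
      = d.getD k [] ++ L.filter (fun p => cc p && key p == k) := by
  induction L generalizing d with
  | nil => simp
  | cons p L ih =>
    simp only [List.foldl_cons, List.filter_cons]
    by_cases hc : cc p
    · rw [if_pos hc, ih, PySem.Dict.getD_insert]
      by_cases hk : k = key p
      · subst hk
        simp [hc, List.append_assoc]
      · have hk2 : (key p == k) = false := beq_eq_false_iff_ne.mpr (fun h => hk h.symm)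
        rw [if_neg hk]
        simp [hc, hk2]
    · simp [hc, ih]

theorem pvBeqComm (a b : Int) : (a == b) = (b == a) := by
  by_cases h : a = b
  · subst h; rfl
  · rw [beq_eq_false_iff_ne.mpr h, beq_eq_false_iff_ne.mpr (Ne.symm h)]

theorem pvProdBeq (a b c d : Int) : ((a, b) == (c, d)) = (a == c && b == d) := rfl

-- 'continue on skip, append on match' is one filtered map
theorem pvFoldlSkipIf {α β : Type} (skip keep : β → Bool) (f : β → α) (L : List β) (acc : List α) :
    L.foldl (fun a q => if skip q then a else if keep q then a ++ [f q] else a) acc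
      = acc ++ (L.filter (fun q => !skip q && keep q)).map f := by
  have h : (fun (a : List α) q => if skip q then a else if keep q then a ++ [f q] else a)
      = fun a q => if !skip q && keep q then a ++ [f q] else a := by
    funext a q; by_cases h1 : skip q <;> by_cases h2 : keep q <;> simp [h1, h2]
  rw [h, PySem.List.foldl_append_if]

-- ===== VERDICT (by name: the statement is the Claim_ definition above) =====
theorem find_optimal_swaps_spec : Claim_equal_find_optimal_swaps := by
  intro grid solution colors _ _
  unfold Spec_find_optimal_swaps find_optimal_swaps find_optimal_swaps_alt
  rw [pvFoldlNested, pvFoldlNested]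
  set cells := (PySem.List.pyRange 0 5 1).flatMap
      (fun i => (PySem.List.pyRange 0 5 1).map (fun j => (i, j))) with hcells
  rw [pvFoldlNested]
  apply PySem.List.foldl_congr_mem
  intro acc p _
  by_cases hc : pvAt colors p.1 p.2 = 0
  · simp [hc]
  · rw [if_neg (by simp [hc]), if_pos (by simp [hc])]
    rw [pvFoldlNested, pvFoldlSkipIf
      (fun (q : Int × Int) => (p.1, p.2) == (q.1, q.2) || !(pvAt colors q.1 q.2 == 0))
      (fun (q : Int × Int) => pvAt grid p.1 p.2 == pvAt solution q.1 q.2 && pvAt grid q.1 q.2 == pvAt solution p.1 p.2)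
      (fun (q : Int × Int) => (p.1, p.2, q.1, q.2))]
    rw [pvBuildGetD (cc := fun q => pvAt colors q.1 q.2 == 0)
      (key := fun q => (pvAt solution q.1 q.2, pvAt grid q.1 q.2))]
    simp only [PySem.Dict.getD_empty, List.nil_append]
    congr 1
    congr 1
    apply List.filter_congr
    intro q _
    by_cases hq : pvAt colors q.1 q.2 = 0
    · by_cases hpq : p = q
      · exact absurd (hpq ▸ hq) hc
      · have hne : (p == q) = false := beq_eq_false_iff_ne.mpr hpq
        have h0 : (pvAt colors q.1 q.2 == 0) = true := beq_iff_eq.mpr hq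
        simp only [hne, h0, pvProdBeq]
        rw [pvBeqComm]
        simp
    · have h0 : (pvAt colors q.1 q.2 == 0) = false := beq_eq_false_iff_ne.mpr hq
      simp [h0]
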